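-- pv_equiv track=rewrite | github.com/quantumquackerydivinearts-cell/DjinnOS-Shyagzun | DjinnOS-Shyagzun/shygazun/kernel_service.py | _wand_damage_extension
-- ===== SOURCE A (Python) =====
-- _WAND_DAMAGE_ALLOWED_IMAGE_EXTENSIONS: tuple[str, ...] = (
--     ".heic",
--     ".heif",
--     ".jpg",
--     ".jpeg",
--     ".png",
--     ".webp",
-- )
--
-- def _wand_damage_extension(filename: str) -> str:
--     lower = str(filename).strip().lower()
--     for suffix in sorted(_WAND_DAMAGE_ALLOWED_IMAGE_EXTENSIONS, key=len, reverse=True):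
--         if lower.endswith(suffix):
--             return suffix
--     dot_idx = lower.rfind(".")
--     if dot_idx < 0:
--         return ""
--     return lower[dot_idx:]
-- ===== SOURCE B (Python) =====
-- def _wand_damage_extension(filename: str) -> str:
--     lower = str(filename).strip().lower()
--     i = lower.rfind(".")
--     return lower[i:] if i >= 0 else ""
-- ===== Notes on version B (the rewrite author's own statement) =====
-- stated objective: simpler
-- what changed: Replaced the scan over the sorted allowed-extension tuple with a single rfind of the last dot: the allowed list is decorative (A returns the last-dot suffix for any input), so B returns lower[rfind('.'):] directly.
import Mathlib
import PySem

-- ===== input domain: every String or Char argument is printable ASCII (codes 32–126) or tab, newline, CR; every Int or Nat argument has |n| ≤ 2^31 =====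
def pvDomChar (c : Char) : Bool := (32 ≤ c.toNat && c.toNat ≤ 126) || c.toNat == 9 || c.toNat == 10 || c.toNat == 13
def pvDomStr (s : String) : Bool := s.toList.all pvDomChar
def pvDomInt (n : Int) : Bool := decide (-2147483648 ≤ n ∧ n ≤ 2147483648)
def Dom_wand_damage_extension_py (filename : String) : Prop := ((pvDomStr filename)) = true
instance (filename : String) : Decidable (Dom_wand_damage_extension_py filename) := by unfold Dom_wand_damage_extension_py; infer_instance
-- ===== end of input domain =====

-- B replaces A's scan over the sorted allowed-extension tuple by a single rfind of the
-- last dot (simpler): A returns the last-dot suffix of the stripped, lowered filename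
-- on every input, so the allowed list is decorative.

-- ===== PORT A =====
def pvAllowedExts : List String := [".heic", ".heif", ".jpg", ".jpeg", ".png", ".webp"]

-- the 'for suffix in …: if lower.endswith(suffix): return suffix' loop
def pvScanA (lower : String) : List String → Option String
  | [] => none
  | s :: rest => if PySem.Str.endswith lower s then some s else pvScanA lower rest

def wand_damage_extension_py (filename : String) : String :=
  let lower := PySem.Str.lower (PySem.Str.strip filename)
  match pvScanA lower (PySem.List.sorted pvAllowedExts PySem.Str.len true) with
  | some suffix => suffix
  | none =>
    let dotIdx := PySem.Str.rfind lower "."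
    if dotIdx < 0 then "" else PySem.Str.slice lower (some dotIdx) none

-- ===== PORT B =====
def wand_damage_extension_py_alt (filename : String) : String :=
  let lower := PySem.Str.lower (PySem.Str.strip filename)
  let i := PySem.Str.rfind lower "."
  if 0 ≤ i then PySem.Str.slice lower (some i) none else ""

-- ===== PRECONDITION & SPEC =====
def Spec_wand_damage_extension_py (filename : String) (out : String) : Prop := out = wand_damage_extension_py_alt filename
instance (filename : String) (out : String) : Decidable (Spec_wand_damage_extension_py filename out) := by unfold Spec_wand_damage_extension_py; infer_instance

-- ===== CLAIM (what is proved, stated in full; the proofs are below) =====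
def Claim_equal_wand_damage_extension_py : Prop := ∀ (filename : String), Dom_wand_damage_extension_py filename → Spec_wand_damage_extension_py filename (wand_damage_extension_py filename)

-- ===== LEMMAS AND PROOFS =====

-- ['.'] is a prefix of xs exactly when xs starts with '.'
lemma pv_singleton_isPrefix (c : Char) (xs : List Char) :
    [c].isPrefixOf xs = true ↔ ∃ t, xs = c :: t := by
  rw [List.isPrefixOf_iff_prefix]
  constructor
  · rintro ⟨t, rfl⟩; exact ⟨t, rfl⟩
  · rintro ⟨t, rfl⟩; exact ⟨t, rfl⟩

-- rfind.go returns k when sub matches at k and at no position in (k, j]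
lemma pv_go_eq (s sub : List Char) (k : Nat) :
    ∀ j : Nat, k ≤ j → sub.isPrefixOf (s.drop k) = true →
    (∀ i, k < i → i ≤ j → sub.isPrefixOf (s.drop i) = false) →
    PySem.Chars.rfind.go s sub j = (k : Int) := by
  intro j
  induction j with
  | zero =>
    intro hk hpre _
    interval_cases k
    simpa [PySem.Chars.rfind.go] using hpre
  | succ j ih =>
    intro hk hpre habove
    rcases Nat.lt_or_ge k (j + 1) with h | h
    · have hfail : sub.isPrefixOf (s.drop (j + 1)) = false :=
        habove (j + 1) h (le_refl _)
      simp only [PySem.Chars.rfind.go, hfail]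
      simp only [Bool.false_eq_true, if_false]
      exact ih (Nat.lt_succ_iff.mp h) hpre (fun i hi hij => habove i hi (Nat.le_succ_of_le hij))
    · have hk1 : k = j + 1 := le_antisymm hk h
      subst hk1
      simp [PySem.Chars.rfind.go, hpre]

-- last occurrence of '.' in pre ++ '.' :: t (with no '.' in t) is at index pre.length
lemma pv_rfind_dot (pre t : List Char) (ht : '.' ∉ t) :
    PySem.Chars.rfind (pre ++ '.' :: t) ['.'] = (pre.length : Int) := by
  unfold PySem.Chars.rfind
  apply pv_go_eq
  · simp
  · simp [List.drop_left' (rfl : pre.length = pre.length), List.isPrefixOf]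
  · intro i hi hij
    rw [Bool.eq_false_iff]
    intro hpre
    rcases (pv_singleton_isPrefix '.' _).mp hpre with ⟨u, hu⟩
    have hdrop : (pre ++ '.' :: t).drop i = t.drop (i - pre.length - 1) := by
      rw [List.drop_append, List.drop_eq_nil_of_le (by omega), List.nil_append,
        show i - pre.length = (i - pre.length - 1) + 1 by omega, List.drop_succ_cons]
      simp
    rw [hdrop] at hu
    have : '.' ∈ t := by
      have := List.drop_subset (l := t) (i - pre.length - 1)
      apply this; rw [hu]; exact List.mem_cons_self
    exact ht this

-- if lower ends with ext = '.'::t ('.' ∉ t) then B returns ext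
lemma pv_alt_of_endswith (lower ext : String) (t : List Char)
    (hext : ext.toList = '.' :: t) (ht : '.' ∉ t)
    (h : PySem.Str.endswith lower ext = true) :
    (if 0 ≤ PySem.Str.rfind lower "." then
        PySem.Str.slice lower (some (PySem.Str.rfind lower ".")) none else "") = ext := by
  rw [PySem.Str.endswith_eq] at h
  rcases (PySem.Chars.endswith_iff _ _).mp h with ⟨pre, hpre⟩
  rw [hext] at hpre
  have hrf : PySem.Str.rfind lower "." = (pre.length : Int) := by
    rw [PySem.Str.rfind_eq]
    have : ".".toList = ['.'] := rfl
    rw [this, ← hpre]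
    exact pv_rfind_dot pre t ht
  rw [hrf]
  rw [if_pos (by positivity)]
  rw [← String.toList_inj, PySem.Str.toList_slice, PySem.Chars.slice_eq_listSlice,
    PySem.List.slice_from_natCast, ← hpre, hext]
  exact List.drop_left' rfl

-- every extension in the scanned list is a dot followed by dot-free characters,
-- so a successful scan returns exactly what B computes
lemma pv_scan_sound (lower : String) : ∀ exts : List String,
    (∀ e ∈ exts, e.toList = '.' :: e.toList.tail ∧ '.' ∉ e.toList.tail) →
    ∀ s, pvScanA lower exts = some s →
    (if 0 ≤ PySem.Str.rfind lower "." then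
        PySem.Str.slice lower (some (PySem.Str.rfind lower ".")) none else "") = s := by
  intro exts
  induction exts with
  | nil => intro _ s hs; simp [pvScanA] at hs
  | cons e rest ih =>
    intro hfmt s hs
    rw [pvScanA] at hs
    by_cases he : PySem.Str.endswith lower e = true
    · rw [if_pos he] at hs
      cases hs
      exact pv_alt_of_endswith lower e e.toList.tail (hfmt e List.mem_cons_self).1
        (hfmt e List.mem_cons_self).2 he
    · rw [if_neg he] at hs
      exact ih (fun x hx => hfmt x (List.mem_cons_of_mem e hx)) s hs

-- ===== VERDICT (by name: the statement is the Claim_ definition above) =====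
theorem wand_damage_extension_py_spec : Claim_equal_wand_damage_extension_py := by
  intro filename _
  unfold Spec_wand_damage_extension_py wand_damage_extension_py wand_damage_extension_py_alt
  set lower := PySem.Str.lower (PySem.Str.strip filename) with hlow
  cases h : pvScanA lower (PySem.List.sorted pvAllowedExts PySem.Str.len true) with
  | some s =>
    simp only [h]
    refine (pv_scan_sound lower _ ?_ s h).symm
    have hsorted : PySem.List.sorted pvAllowedExts PySem.Str.len true
        = [".heic", ".heif", ".jpeg", ".webp", ".jpg", ".png"] := by decide
    rw [hsorted]
    decide
  | none =>
    simp only [h]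
    rcases lt_or_ge (PySem.Str.rfind lower ".") 0 with hlt | hge
    · rw [if_pos hlt, if_neg (by omega)]
    · rw [if_neg (by omega), if_pos hge]
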